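-- pv_equiv track=rewrite | github.com/koutali/project_euler | src/problem17.py | countLettersInString
-- ===== SOURCE A (Python) =====
-- def countLettersInString(string):
--     letterCount = 0
--     for ch in string:
--         if ch == " " or ch == "-":
--             continue
--         else:
--             letterCount += 1
--
--     return letterCount
-- ===== SOURCE B (Python) =====
-- def countLettersInString(string):
--     return len(string) - string.count(" ") - string.count("-")
-- ===== Notes on version B (the rewrite author's own statement) =====
-- stated objective: faster
-- what changed: Replaces the per-character loop-with-branch by a closed-form complement: total length minus the counts of the two excluded characters, via C-speed str.count.
import Mathlib
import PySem

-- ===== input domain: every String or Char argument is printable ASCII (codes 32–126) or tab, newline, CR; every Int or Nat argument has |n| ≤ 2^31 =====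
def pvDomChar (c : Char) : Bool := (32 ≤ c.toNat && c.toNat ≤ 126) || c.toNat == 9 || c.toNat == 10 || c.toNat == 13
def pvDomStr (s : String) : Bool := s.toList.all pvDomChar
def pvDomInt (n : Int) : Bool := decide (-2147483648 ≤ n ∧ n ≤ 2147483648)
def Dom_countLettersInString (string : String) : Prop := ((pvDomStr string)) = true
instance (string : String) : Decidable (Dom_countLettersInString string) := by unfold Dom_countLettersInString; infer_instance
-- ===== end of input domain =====

-- B computes the count as a closed-form complement: length minus the counts of ' ' and '-' (objective: simpler).


-- ===== PORT A =====
def countLettersInString (string : String) : Int :=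
  string.toList.foldl (fun letterCount ch =>
    if ch == ' ' || ch == '-' then letterCount else letterCount + 1) 0

-- ===== PORT B =====
def countLettersInString_alt (string : String) : Int :=
  (PySem.Str.len string : Int) - (PySem.Str.count string " " : Int)
    - (PySem.Str.count string "-" : Int)

-- ===== PRECONDITION & SPEC =====
def Spec_countLettersInString (string : String) (out : Int) : Prop := out = countLettersInString_alt string
instance (string : String) (out : Int) : Decidable (Spec_countLettersInString string out) := by unfold Spec_countLettersInString; infer_instance

-- ===== CLAIM (what is proved, stated in full; the proofs are below) =====
def Claim_equal_countLettersInString : Prop := ∀ (string : String), Dom_countLettersInString string → Spec_countLettersInString string (countLettersInString string)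

-- ===== LEMMAS AND PROOFS =====

-- single-character substring count in Python's str.count IS the element count
theorem chars_count_go_singleton (c : Char) (l : List Char) (fuel acc : Nat)
    (h : l.length ≤ fuel) :
    PySem.Chars.count.go [c] fuel l acc = acc + l.count c := by
  induction l generalizing fuel acc with
  | nil =>
    cases fuel <;> simp [PySem.Chars.count.go]
  | cons hd t ih =>
    cases fuel with
    | zero => simp at h
    | succ f =>
      have hf : t.length ≤ f := Nat.le_of_succ_le_succ (by simpa using h)
      rw [PySem.Chars.count.go]
      by_cases hc : hd = c
      · rw [if_pos (by simp [List.isPrefixOf, hc])]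
        have hdrop : List.drop ([c].length) (hd :: t) = t := by simp
        rw [hdrop, ih f (acc + 1) hf]
        simp [hc, List.count_cons]
        omega
      · rw [if_neg (by simp [List.isPrefixOf]; exact fun hh => absurd hh.symm hc)]
        rw [ih f acc hf]
        simp [List.count_cons, hc]

theorem chars_count_singleton (c : Char) (l : List Char) :
    PySem.Chars.count l [c] = l.count c := by
  unfold PySem.Chars.count
  simp [chars_count_go_singleton c l l.length 0 (le_refl _)]

theorem foldl_skip_two (l : List Char) (acc : Int) :
    l.foldl (fun letterCount ch =>
      if ch == ' ' || ch == '-' then letterCount else letterCount + 1) acc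
    = acc + (l.length : Int) - (l.count ' ' : Int) - (l.count '-' : Int) := by
  induction l generalizing acc with
  | nil => simp
  | cons hd t ih =>
    simp only [List.foldl_cons, List.count_cons, List.length_cons]
    by_cases h1 : hd = ' '
    · subst h1; rw [if_pos (by decide)]; rw [ih]; simp; push_cast; ring
    · by_cases h2 : hd = '-'
      · subst h2; rw [if_pos (by decide)]; rw [ih]; simp [h1]; push_cast; ring
      · rw [if_neg (by simp [h1, h2])]; rw [ih]; simp [h1, h2]; push_cast; ring

-- ===== VERDICT (by name: the statement is the Claim_ definition above) =====
theorem countLettersInString_spec : Claim_equal_countLettersInString := by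
  intro s _
  unfold Spec_countLettersInString countLettersInString countLettersInString_alt
  rw [foldl_skip_two]
  have h1 : PySem.Str.count s " " = s.toList.count ' ' := by
    rw [PySem.Str.count_eq]; exact chars_count_singleton ' ' s.toList
  have h2 : PySem.Str.count s "-" = s.toList.count '-' := by
    rw [PySem.Str.count_eq]; exact chars_count_singleton '-' s.toList
  rw [h1, h2, PySem.Str.len_eq]
  ring
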